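-- pv_equiv track=rewrite | github.com/edoardocarpentiero/PerformanceWeightedScheduler | devstack/unpatch_volume_manager.py | cleanup_extra_blank_lines
-- ===== SOURCE A (Python) =====
-- def cleanup_extra_blank_lines(lines: list[str]) -> list[str]:
--     cleaned = []
--     blank_count = 0
--
--     for line in lines:
--         if line.strip() == "":
--             blank_count += 1
--         else:
--             blank_count = 0
--
--         if blank_count <= 2:
--             cleaned.append(line)
--
--     return cleaned
-- ===== SOURCE B (Python) =====
-- def cleanup_extra_blank_lines(lines: list[str]) -> list[str]:
--     out = []
--     i = 0
--     n = len(lines)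
--     while i < n:
--         blank = lines[i].strip() == ""
--         j = i + 1
--         while j < n and (lines[j].strip() == "") == blank:
--             j += 1
--         if blank:
--             out.extend(lines[i:min(i + 2, j)])
--         else:
--             out.extend(lines[i:j])
--         i = j
--     return out
-- ===== Notes on version B (the rewrite author's own statement) =====
-- stated objective: alternative
-- what changed: Replaces the per-line running blank counter with explicit run grouping: scan each maximal run of equal blankness and append the whole run (non-blank) or its first two lines (blank).
import Mathlib
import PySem

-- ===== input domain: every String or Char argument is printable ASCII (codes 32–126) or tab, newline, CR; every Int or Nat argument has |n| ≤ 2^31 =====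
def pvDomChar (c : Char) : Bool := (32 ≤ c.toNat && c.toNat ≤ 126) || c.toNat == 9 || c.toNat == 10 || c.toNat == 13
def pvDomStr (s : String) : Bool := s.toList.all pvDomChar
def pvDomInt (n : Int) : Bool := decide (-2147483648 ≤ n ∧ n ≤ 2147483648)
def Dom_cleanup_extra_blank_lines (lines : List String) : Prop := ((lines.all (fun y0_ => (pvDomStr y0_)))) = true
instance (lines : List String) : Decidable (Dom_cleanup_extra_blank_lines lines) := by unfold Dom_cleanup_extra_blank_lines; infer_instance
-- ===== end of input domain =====

-- B replaces A's per-line running blank counter by explicit grouping of maximal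
-- blank/non-blank runs (truncating blank runs to two lines); same cost, different decomposition.


-- ===== PORT A =====
-- 'line.strip() == ""' test, shared blank predicate
def pvBlank (s : String) : Bool := PySem.Str.strip s == ""

-- A's for-loop over lines with state (cleaned, blank_count), step for step
def pvGoA (cleaned : List String) (blank_count : Int) : List String → List String
  | [] => cleaned
  | line :: rest =>
    let bc := if pvBlank line then blank_count + 1 else 0
    let cleaned' := if bc ≤ 2 then cleaned ++ [line] else cleaned
    pvGoA cleaned' bc rest

def cleanup_extra_blank_lines (lines : List String) : List String :=
  pvGoA [] 0 lines

-- ===== PORT B =====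
-- B's outer while-loop: take the maximal run of lines with the head's blankness
-- (the inner while-loop's scan), emit it (truncated to 2 if blank), recurse on the rest
def pvGoB : List String → List String
  | [] => []
  | line :: rest =>
    if pvBlank line then
      (line :: rest.takeWhile (fun x => pvBlank x)).take 2 ++ pvGoB (rest.dropWhile (fun x => pvBlank x))
    else
      (line :: rest.takeWhile (fun x => !pvBlank x)) ++ pvGoB (rest.dropWhile (fun x => !pvBlank x))
  termination_by ls => ls.length
  decreasing_by
    · exact Nat.lt_succ_of_le (List.length_dropWhile_le _ _)
    · exact Nat.lt_succ_of_le (List.length_dropWhile_le _ _)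

def cleanup_extra_blank_lines_alt (lines : List String) : List String :=
  pvGoB lines

-- ===== PRECONDITION & SPEC =====
def Spec_cleanup_extra_blank_lines (lines : List String) (out : List String) : Prop := out = cleanup_extra_blank_lines_alt lines
instance (lines : List String) (out : List String) : Decidable (Spec_cleanup_extra_blank_lines lines out) := by unfold Spec_cleanup_extra_blank_lines; infer_instance

-- ===== CLAIM (what is proved, stated in full; the proofs are below) =====
def Claim_equal_cleanup_extra_blank_lines : Prop := ∀ (lines : List String), Dom_cleanup_extra_blank_lines lines → Spec_cleanup_extra_blank_lines lines (cleanup_extra_blank_lines lines)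

-- ===== LEMMAS AND PROOFS =====

theorem pvGoA_append (acc : List String) (c : Int) (ls : List String) :
    pvGoA acc c ls = acc ++ pvGoA [] c ls := by
  induction ls generalizing acc c with
  | nil => simp [pvGoA]
  | cons l ls ih =>
    simp only [pvGoA]
    split_ifs <;> first
      | exact ih _ _
      | (rw [ih (acc ++ [l]), ih ([] ++ [l])]; simp)

-- pvGoB absorbs a leading maximal blank run (trivially when the head is not blank)
theorem pvGoB_blank_run (ls : List String) :
    pvGoB ls = (ls.takeWhile (fun x => pvBlank x)).take 2 ++ pvGoB (ls.dropWhile (fun x => pvBlank x)) := by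
  cases ls with
  | nil => simp [pvGoB]
  | cons l ls =>
    by_cases hb : pvBlank l
    · rw [pvGoB]; simp [hb]
    · simp [hb]

-- pvGoB absorbs a leading maximal non-blank run
theorem pvGoB_nonblank_run (ls : List String) :
    pvGoB ls = ls.takeWhile (fun x => !pvBlank x) ++ pvGoB (ls.dropWhile (fun x => !pvBlank x)) := by
  cases ls with
  | nil => simp [pvGoB]
  | cons l ls =>
    by_cases hb : pvBlank l
    · simp [hb]
    · rw [pvGoB]; simp [hb]

-- the blank-run and non-blank-run decompositions of pvGoB's output coincide
theorem pvRun_swap (ls : List String) :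
    (ls.takeWhile (fun x => pvBlank x)).take 2 ++ pvGoB (ls.dropWhile (fun x => pvBlank x))
      = ls.takeWhile (fun x => !pvBlank x) ++ pvGoB (ls.dropWhile (fun x => !pvBlank x)) := by
  cases ls with
  | nil => simp
  | cons a as =>
    by_cases ha : pvBlank a
    · have h1 : (a :: as).takeWhile (fun x => !pvBlank x) = [] := by simp [ha]
      have h2 : (a :: as).dropWhile (fun x => !pvBlank x) = a :: as := by simp [ha]
      rw [h1, h2, pvGoB_blank_run (a :: as)]
      simp
    · have h1 : (a :: as).takeWhile (fun x => pvBlank x) = [] := by simp [ha]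
      have h2 : (a :: as).dropWhile (fun x => pvBlank x) = a :: as := by simp [ha]
      rw [h1, h2, pvGoB_nonblank_run (a :: as)]
      simp

-- main invariant: A's loop from blank count c ≥ 0 keeps the first (2-c) lines of the
-- current blank run and then agrees with B's grouping of the remainder
theorem pvGoA_eq (ls : List String) : ∀ c : Int, 0 ≤ c →
    pvGoA [] c ls
      = (ls.takeWhile (fun x => pvBlank x)).take (2 - c).toNat
        ++ pvGoB (ls.dropWhile (fun x => pvBlank x)) := by
  induction ls with
  | nil => intro c _; simp [pvGoA, pvGoB]
  | cons l ls ih =>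
    intro c hc
    by_cases hb : pvBlank l
    · simp only [pvGoA, hb, if_true]
      rw [pvGoA_append, ih (c + 1) (by omega)]
      simp only [List.takeWhile_cons, List.dropWhile_cons, hb, if_true]
      by_cases h2 : c + 1 ≤ 2
      · have e : (2 - c).toNat = (2 - (c + 1)).toNat + 1 := by omega
        simp [h2, e]
      · have e1 : (2 - c).toNat = 0 := by omega
        have e2 : (2 - (c + 1)).toNat = 0 := by omega
        simp [h2, e1, e2]
    · simp only [pvGoA, hb, Bool.false_eq_true, if_false]
      rw [if_pos (by omega : (0:Int) ≤ 2)]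
      rw [pvGoA_append, ih 0 le_rfl]
      rw [show ((2:Int) - 0).toNat = 2 from rfl, pvRun_swap ls]
      conv_rhs => rw [List.takeWhile_cons, List.dropWhile_cons]
      simp only [hb, Bool.false_eq_true, if_false]
      conv_rhs => rw [pvGoB_nonblank_run (l :: ls)]
      simp [hb]

-- ===== VERDICT (by name: the statement is the Claim_ definition above) =====
theorem cleanup_extra_blank_lines_spec : Claim_equal_cleanup_extra_blank_lines := by
  intro lines _
  unfold Spec_cleanup_extra_blank_lines cleanup_extra_blank_lines cleanup_extra_blank_lines_alt
  rw [pvGoA_eq lines 0 le_rfl, pvGoB_blank_run lines,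
    show ((2:Int) - 0).toNat = 2 from rfl]
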